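-- pv_equiv track=rewrite | github.com/swaroop-nath/Semantic-Web-Parser | Second Model Preparation/data_gathering_script.py | findTagType
-- ===== SOURCE A (Python) =====
-- header_tags = ['h1', 'h2', 'h3', 'h4', 'h5', 'h6']
--
-- formatting_tags = ['i', 'b', 'u', 'em', 'small', 'strike', 'strong']
--
-- math_element_tags = ['mi', 'mo', 'mrow', 'mstyle', 'mfrac', 'msub', 'mtable', 'mtr', 'mtd', 'mn', 'mover', 'munder', 'msqrt', 'msup', 'mtext']
--
-- FLAG_HEADER = 'header'
--
-- FLAG_PARA = 'paragraph'
--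
-- FLAG_FORMATTING = 'formatting'
--
-- FLAG_SPAN = 'span'
--
-- FLAG_IMG = 'img'
--
-- FLAG_TABLE = 'table'
--
-- FLAG_SUP = 'sup'
--
-- FLAG_A = 'a'
--
-- FLAG_DL_DD = 'dl_dd'
--
-- FLAG_MATH_TYPE = 'math_semantics'
--
-- FLAG_MATH_ELEM = 'math_elements'
--
-- FLAG_ANNOTATION = 'annotation'
--
-- FLAG_TABLE_ELEMENT = 'table_element'
--
-- def findTagType(name):
--     name = name.strip()
--     for header in header_tags:
--         if header == name: return FLAG_HEADER
--     if name == 'span': return FLAG_SPAN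
--     if name == 'p': return FLAG_PARA
--     for format_tag in formatting_tags:
--         if name == format_tag: return FLAG_FORMATTING
--     if name == 'img': return FLAG_IMG
--     if 'table' == name or 'tbody' == name: return FLAG_TABLE
--     if name == 'sup': return FLAG_SUP
--     if name == 'a': return FLAG_A
--     if name == 'td' or name == 'tr' or name == 'th': return FLAG_TABLE_ELEMENT
--     if name == 'dl' or name == 'dd': return FLAG_DL_DD
--     if name == 'math' or name == 'semantics': return FLAG_MATH_TYPE
--     for math_elem in math_element_tags:
--         if math_elem == name: return FLAG_MATH_ELEM
--     if name == 'annotation': return FLAG_ANNOTATION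
-- ===== SOURCE B (Python) =====
-- # B: a character trie built once from (tag, flag) pairs; lookup walks the
-- # trie one character at a time instead of comparing whole tag names.
--
-- _TAG_PAIRS = [
--     ('h1', 'header'), ('h2', 'header'), ('h3', 'header'), ('h4', 'header'),
--     ('h5', 'header'), ('h6', 'header'),
--     ('span', 'span'),
--     ('p', 'paragraph'),
--     ('i', 'formatting'), ('b', 'formatting'), ('u', 'formatting'),
--     ('em', 'formatting'), ('small', 'formatting'), ('strike', 'formatting'),
--     ('strong', 'formatting'),
--     ('img', 'img'),
--     ('table', 'table'), ('tbody', 'table'),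
--     ('sup', 'sup'),
--     ('a', 'a'),
--     ('td', 'table_element'), ('tr', 'table_element'), ('th', 'table_element'),
--     ('dl', 'dl_dd'), ('dd', 'dl_dd'),
--     ('math', 'math_semantics'), ('semantics', 'math_semantics'),
--     ('mi', 'math_elements'), ('mo', 'math_elements'), ('mrow', 'math_elements'),
--     ('mstyle', 'math_elements'), ('mfrac', 'math_elements'),
--     ('msub', 'math_elements'), ('mtable', 'math_elements'),
--     ('mtr', 'math_elements'), ('mtd', 'math_elements'),
--     ('mn', 'math_elements'), ('mover', 'math_elements'),
--     ('munder', 'math_elements'), ('msqrt', 'math_elements'),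
--     ('msup', 'math_elements'), ('mtext', 'math_elements'),
--     ('annotation', 'annotation'),
-- ]
--
-- _TRIE = {}
-- for _tag, _flag in _TAG_PAIRS:
--     _node = _TRIE
--     for _ch in _tag:
--         _node = _node.setdefault(_ch, {})
--     _node[''] = _flag  # terminal flag stored under the empty key
--
-- def findTagType(name):
--     node = _TRIE
--     for ch in name.strip():
--         node = node.get(ch)
--         if node is None:
--             return None
--     return node.get('')
-- ===== Notes on version B (the rewrite author's own statement) =====
-- stated objective: alternative
-- what changed: Replaces the three membership loops and the long if-chain with a character trie built once from the (tag, flag) pairs; lookup walks the trie one character of the stripped name at a time instead of comparing whole tag names.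
import Mathlib
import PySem

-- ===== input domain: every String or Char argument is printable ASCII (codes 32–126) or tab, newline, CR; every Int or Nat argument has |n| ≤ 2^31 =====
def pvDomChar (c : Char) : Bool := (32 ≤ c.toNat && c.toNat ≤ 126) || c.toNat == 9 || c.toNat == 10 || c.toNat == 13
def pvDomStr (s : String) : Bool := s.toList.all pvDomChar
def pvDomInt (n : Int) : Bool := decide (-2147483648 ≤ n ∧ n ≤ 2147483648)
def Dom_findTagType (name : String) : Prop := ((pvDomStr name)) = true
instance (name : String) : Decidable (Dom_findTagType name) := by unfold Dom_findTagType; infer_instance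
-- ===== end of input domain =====

-- B replaces A's three loops and if-chain by a character trie built once from the
-- (tag, flag) pairs; the lookup walks the trie one character at a time (alternative
-- algorithm; no speed claim).

-- ===== PORT A =====
def headerTags : List String := ["h1", "h2", "h3", "h4", "h5", "h6"]
def formattingTags : List String := ["i", "b", "u", "em", "small", "strike", "strong"]
def mathElementTags : List String := ["mi", "mo", "mrow", "mstyle", "mfrac", "msub", "mtable", "mtr", "mtd", "mn", "mover", "munder", "msqrt", "msup", "mtext"]

def findTagType (name : String) : Option String :=
  let n := PySem.Str.strip name
  if headerTags.any (fun header => header == n) then some "header"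
  else if n == "span" then some "span"
  else if n == "p" then some "paragraph"
  else if formattingTags.any (fun t => n == t) then some "formatting"
  else if n == "img" then some "img"
  else if "table" == n || "tbody" == n then some "table"
  else if n == "sup" then some "sup"
  else if n == "a" then some "a"
  else if n == "td" || n == "tr" || n == "th" then some "table_element"
  else if n == "dl" || n == "dd" then some "dl_dd"
  else if n == "math" || n == "semantics" then some "math_semantics"
  else if mathElementTags.any (fun t => t == n) then some "math_elements"
  else if n == "annotation" then some "annotation"
  else none

-- ===== PORT B =====
-- Trie node in first-child / next-sibling form: a `node` carries its character,
-- the flag stored under Python's '' key (if any), its child chain and the next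
-- sibling.  A Python trie dict {ch: subdict, '': flag} is the sibling chain of
-- its char entries plus the optional '' flag held by the parent node.
inductive PTrie : Type where
  | nil  : PTrie
  | node : Char → Option String → PTrie → PTrie → PTrie
deriving Repr

def tagPairs : List (String × String) :=
  [("h1", "header"), ("h2", "header"), ("h3", "header"), ("h4", "header"),
   ("h5", "header"), ("h6", "header"),
   ("span", "span"),
   ("p", "paragraph"),
   ("i", "formatting"), ("b", "formatting"), ("u", "formatting"),
   ("em", "formatting"), ("small", "formatting"), ("strike", "formatting"),
   ("strong", "formatting"),
   ("img", "img"),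
   ("table", "table"), ("tbody", "table"),
   ("sup", "sup"),
   ("a", "a"),
   ("td", "table_element"), ("tr", "table_element"), ("th", "table_element"),
   ("dl", "dl_dd"), ("dd", "dl_dd"),
   ("math", "math_semantics"), ("semantics", "math_semantics"),
   ("mi", "math_elements"), ("mo", "math_elements"), ("mrow", "math_elements"),
   ("mstyle", "math_elements"), ("mfrac", "math_elements"),
   ("msub", "math_elements"), ("mtable", "math_elements"),
   ("mtr", "math_elements"), ("mtd", "math_elements"),
   ("mn", "math_elements"), ("mover", "math_elements"),
   ("munder", "math_elements"), ("msqrt", "math_elements"),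
   ("msup", "math_elements"), ("mtext", "math_elements"),
   ("annotation", "annotation")]

-- build helpers: Python's `node.setdefault(ch, {})` / `node[''] = flag`
-- set the flag of the sibling whose char is c (appending a fresh node if absent)
def setTerm : PTrie → Char → String → PTrie
  | .nil, c, f => .node c (some f) .nil .nil
  | .node c' t ch nx, c, f =>
      if c' == c then .node c' (some f) ch nx
      else .node c' t ch (setTerm nx c f)

-- apply g to the child chain of the sibling whose char is c (appending if absent)
def modifyChild : PTrie → Char → (PTrie → PTrie) → PTrie
  | .nil, c, g => .node c none (g .nil) .nil
  | .node c' t ch nx, c, g =>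
      if c' == c then .node c' t (g ch) nx
      else .node c' t ch (modifyChild nx c g)

-- insert one (tag, flag) pair, walking the key's characters
def insertTag : PTrie → List Char → String → PTrie
  | tr, [], _ => tr          -- unreachable: every tag is nonempty
  | tr, [c], f => setTerm tr c f
  | tr, c :: cs, f => modifyChild tr c (fun ch => insertTag ch cs f)

def trieRoot : PTrie := tagPairs.foldl (fun tr p => insertTag tr p.1.toList p.2) .nil

-- the lookup loop: term = flag of the current node ('' entry), tr = its children
def walk : Option String → PTrie → List Char → Option String
  | term, _, [] => term
  | _, tr, c :: cs =>
      match childGet tr c with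
      | none => none
      | some (term', child') => walk term' child' cs
where childGet : PTrie → Char → Option (Option String × PTrie)
  | .nil, _ => none
  | .node c' t ch nx, c => if c' == c then some (t, ch) else childGet nx c

def findTagType_alt (name : String) : Option String :=
  walk none trieRoot (PySem.Str.strip name).toList

-- ===== PRECONDITION & SPEC =====
def Spec_findTagType (name : String) (out : Option String) : Prop := out = findTagType_alt name
instance (name : String) (out : Option String) : Decidable (Spec_findTagType name out) := by unfold Spec_findTagType; infer_instance

-- ===== CLAIM (what is proved, stated in full; the proofs are below) =====
def Claim_equal_findTagType : Prop := ∀ (name : String), Dom_findTagType name → Spec_findTagType name (findTagType name)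

-- ===== LEMMAS AND PROOFS =====
set_option maxRecDepth 8000
set_option maxHeartbeats 4000000

-- proof helpers: the same mapping as a flat dictionary, and the flattening of a trie
def tagFlags : PySem.Dict String String := PySem.Dict.ofList tagPairs

def allTagKeys : List String := tagPairs.map Prod.fst

-- all (key, flag) pairs reachable from a sibling chain
def flat : PTrie → List (List Char × String)
  | .nil => []
  | .node c term ch nx =>
      (match term with | some f => [([c], f)] | none => []) ++
      (flat ch).map (fun p => (c :: p.1, p.2)) ++ flat nx

def hasC : PTrie → Char → Bool
  | .nil, _ => false
  | .node c' _ _ nx, c => c' == c || hasC nx c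

-- chars are distinct along every sibling chain
def trieWF : PTrie → Bool
  | .nil => true
  | .node c _ ch nx => !(hasC nx c) && trieWF ch && trieWF nx

theorem wf_trieRoot : trieWF trieRoot = true := by decide

theorem lookup_map_cons (c' c : Char) (cs : List Char) (l : List (List Char × String)) :
    List.lookup (c :: cs) (l.map (fun p => (c' :: p.1, p.2))) =
      if c' = c then List.lookup cs l else none := by
  induction l with
  | nil => simp [List.lookup]
  | cons p t ih =>
    obtain ⟨k, v⟩ := p
    by_cases h : c' = c
    · subst h
      by_cases hk : cs = k
      · subst hk; simp [List.lookup]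
      · have hb : ((c' :: cs) == (c' :: k)) = false := by
          simp [List.cons_beq_cons, hk]
        have hck : (cs == k) = false := beq_eq_false_iff_ne.mpr hk
        simp [List.lookup, hb, hck, ih]
    · have hb : ((c :: cs) == (c' :: k)) = false := by
        simp [List.cons_beq_cons]; intro h'; exact absurd h'.symm h
      simp [List.lookup, hb, ih, h]

theorem lookup_flat_nil (t : PTrie) : List.lookup ([] : List Char) (flat t) = none := by
  induction t with
  | nil => rfl
  | node c term ch nx ihch ihnx =>
    have hmap : List.lookup ([] : List Char) ((flat ch).map (fun p => (c :: p.1, p.2))) = none := by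
      induction flat ch with
      | nil => rfl
      | cons p t ih => simp [List.lookup, ih]
    cases term <;> simp [flat, List.lookup_append, hmap, ihnx, List.lookup]

theorem lookup_flat_not_has (t : PTrie) (c : Char) (cs : List Char) (h : hasC t c = false) :
    List.lookup (c :: cs) (flat t) = none := by
  induction t with
  | nil => rfl
  | node c' term ch nx ihch ihnx =>
    simp [hasC, Bool.or_eq_false_iff] at h
    obtain ⟨h1, h2⟩ := h
    have hne : c' ≠ c := by simpa using h1
    have hmap := lookup_map_cons c' c cs (flat ch)
    rw [if_neg hne] at hmap
    have hterm : List.lookup (c :: cs) (match term with | some f => [([c'], f)] | none => ([] : List (List Char × String))) = none := by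
      cases term with
      | none => rfl
      | some f =>
        have : ((c :: cs) == ([c'] : List Char)) = false := by
          simp [List.cons_beq_cons]; intro h'; exact absurd h'.symm hne
        simp [List.lookup, this]
    simp [flat, List.lookup_append, hterm, hmap, ihnx h2]

theorem walk_cons (cs : List Char) : ∀ (c : Char) (term : Option String) (t : PTrie),
    trieWF t = true → walk term t (c :: cs) = List.lookup (c :: cs) (flat t) := by
  induction cs with
  | nil =>
    intro c term t hwf
    induction t with
    | nil => rfl
    | node c' term' ch nx ihch ihnx =>
      simp [trieWF, Bool.and_eq_true] at hwf
      obtain ⟨⟨hh, hwch⟩, hwnx⟩ := hwf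
      by_cases h : c' = c
      · subst h
        have hg : walk.childGet (.node c' term' ch nx) c' = some (term', ch) := by
          simp [walk.childGet]
        have hL : walk term (.node c' term' ch nx) [c'] = term' := by
          simp [walk, hg]
        have hmap := lookup_map_cons c' c' ([] : List Char) (flat ch)
        rw [if_pos rfl, lookup_flat_nil] at hmap
        have hnx : List.lookup ([c'] : List Char) (flat nx) = none :=
          lookup_flat_not_has nx c' [] (by simpa using hh)
        rw [hL]
        cases term' with
        | none => simp [flat, List.lookup_append, hmap, hnx]
        | some f => simp [flat]
      · have hg : walk.childGet (.node c' term' ch nx) c = walk.childGet nx c := by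
          simp [walk.childGet, h]
        have hL : walk term (.node c' term' ch nx) [c] = walk term nx [c] := by
          simp [walk, hg]
        have hterm : List.lookup ([c] : List Char) (match term' with | some f => [([c'], f)] | none => ([] : List (List Char × String))) = none := by
          cases term' with
          | none => rfl
          | some f =>
            have hb : (([c] : List Char) == ([c'] : List Char)) = false := by
              simp [List.cons_beq_cons]; intro h'; exact absurd h'.symm h
            simp [List.lookup, hb]
        have hmap := lookup_map_cons c' c ([] : List Char) (flat ch)
        rw [if_neg h] at hmap
        rw [hL, ihnx hwnx]
        simp [flat, List.lookup_append, hterm, hmap]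
  | cons c2 cs2 ih =>
    intro c term t hwf
    induction t with
    | nil => rfl
    | node c' term' ch nx ihch ihnx =>
      simp [trieWF, Bool.and_eq_true] at hwf
      obtain ⟨⟨hh, hwch⟩, hwnx⟩ := hwf
      by_cases h : c' = c
      · subst h
        have hg : walk.childGet (.node c' term' ch nx) c' = some (term', ch) := by
          simp [walk.childGet]
        have hL : walk term (.node c' term' ch nx) (c' :: c2 :: cs2) = walk term' ch (c2 :: cs2) := by
          simp [walk, hg]
        have hmap := lookup_map_cons c' c' (c2 :: cs2) (flat ch)
        rw [if_pos rfl] at hmap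
        have hnx : List.lookup (c' :: c2 :: cs2) (flat nx) = none :=
          lookup_flat_not_has nx c' (c2 :: cs2) (by simpa using hh)
        have hterm : List.lookup (c' :: c2 :: cs2) (match term' with | some f => [([c'], f)] | none => ([] : List (List Char × String))) = none := by
          cases term' with
          | none => rfl
          | some f =>
            have hb : ((c' :: c2 :: cs2 : List Char) == ([c'] : List Char)) = false := by
              simp [List.cons_beq_cons]
            simp [List.lookup, hb]
        rw [hL, ih c2 term' ch hwch]
        simp [flat, List.lookup_append, hterm, hmap, hnx]
      · have hg : walk.childGet (.node c' term' ch nx) c = walk.childGet nx c := by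
          simp [walk.childGet, h]
        have hL : walk term (.node c' term' ch nx) (c :: c2 :: cs2) = walk term nx (c :: c2 :: cs2) := by
          simp [walk, hg]
        have hterm : List.lookup (c :: c2 :: cs2) (match term' with | some f => [([c'], f)] | none => ([] : List (List Char × String))) = none := by
          cases term' with
          | none => rfl
          | some f =>
            have hb : ((c :: c2 :: cs2 : List Char) == ([c'] : List Char)) = false := by
              simp [List.cons_beq_cons]
            simp [List.lookup, hb]
        have hmap := lookup_map_cons c' c (c2 :: cs2) (flat ch)
        rw [if_neg h] at hmap
        rw [hL, ihnx hwnx]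
        simp [flat, List.lookup_append, hterm, hmap]

theorem tagFlags_keys : tagFlags.keys = allTagKeys := by decide

theorem flat_keys_sub : ∀ k ∈ (flat trieRoot).map Prod.fst, k ∈ allTagKeys.map String.toList := by decide

theorem lookup_eq_none_of_not_mem {k : List Char} {l : List (List Char × String)}
    (h : k ∉ l.map Prod.fst) : List.lookup k l = none := by
  induction l with
  | nil => rfl
  | cons p t ih =>
    obtain ⟨k', v'⟩ := p
    simp only [List.map_cons, List.mem_cons, not_or] at h
    obtain ⟨h1, h2⟩ := h
    have hb : (k == k') = false := beq_eq_false_iff_ne.mpr h1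
    simp [List.lookup, hb, ih h2]

theorem bridge (s : String) : walk none trieRoot s.toList = tagFlags.get? s := by
  by_cases h : s ∈ allTagKeys
  · fin_cases h <;> rfl
  · have hd : tagFlags.get? s = none := by
      rw [PySem.Dict.get?_eq_none_iff_not_mem_keys, tagFlags_keys]
      exact h
    rw [hd]
    have hnm : s.toList ∉ (flat trieRoot).map Prod.fst := by
      intro hmem
      obtain ⟨k, hk, hke⟩ := List.mem_map.mp (flat_keys_sub _ hmem)
      exact h (String.toList_inj.mp hke.symm ▸ hk)
    cases hs : s.toList with
    | nil => rfl
    | cons c cs =>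
      rw [walk_cons cs c none trieRoot wf_trieRoot]
      exact lookup_eq_none_of_not_mem (hs ▸ hnm)

theorem chain_eq_lookup (s : String) :
    (if headerTags.any (fun header => header == s) then some "header"
     else if s == "span" then some "span"
     else if s == "p" then some "paragraph"
     else if formattingTags.any (fun t => s == t) then some "formatting"
     else if s == "img" then some "img"
     else if "table" == s || "tbody" == s then some "table"
     else if s == "sup" then some "sup"
     else if s == "a" then some "a"
     else if s == "td" || s == "tr" || s == "th" then some "table_element"
     else if s == "dl" || s == "dd" then some "dl_dd"
     else if s == "math" || s == "semantics" then some "math_semantics"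
     else if mathElementTags.any (fun t => t == s) then some "math_elements"
     else if s == "annotation" then some "annotation"
     else none) = tagFlags.get? s := by
  by_cases h : s ∈ allTagKeys
  · fin_cases h <;> rfl
  · have hr : tagFlags.get? s = none := by
      rw [PySem.Dict.get?_eq_none_iff_not_mem_keys, tagFlags_keys]
      exact h
    rw [hr]
    simp only [allTagKeys, tagPairs, List.map, List.mem_cons, List.not_mem_nil, or_false, not_or] at h
    obtain ⟨h1, h2, h3, h4, h5, h6, h7, h8, h9, h10, h11, h12, h13, h14, h15, h16, h17, h18, h19, h20, h21, h22, h23, h24, h25, h26, h27, h28, h29, h30, h31, h32, h33, h34, h35, h36, h37, h38, h39, h40, h41, h42, h43⟩ := h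
    simp [headerTags, formattingTags, mathElementTags, h1, h2, h3, h4, h5, h6, h7, h8, h9, h10, h11, h12, h13, h14, h15, h16, h17, h18, h19, h20, h21, h22, h23, h24, h25, h26, h27, h28, h29, h30, h31, h32, h33, h34, h35, h36, h37, h38, h39, h40, h41, h42, h43, Ne.symm h1, Ne.symm h2, Ne.symm h3, Ne.symm h4, Ne.symm h5, Ne.symm h6, Ne.symm h7, Ne.symm h8, Ne.symm h9, Ne.symm h10, Ne.symm h11, Ne.symm h12, Ne.symm h13, Ne.symm h14, Ne.symm h15, Ne.symm h16, Ne.symm h17, Ne.symm h18, Ne.symm h19, Ne.symm h20, Ne.symm h21, Ne.symm h22, Ne.symm h23, Ne.symm h28, Ne.symm h29, Ne.symm h30, Ne.symm h31, Ne.symm h32, Ne.symm h33, Ne.symm h34, Ne.symm h35, Ne.symm h36, Ne.symm h37, Ne.symm h38, Ne.symm h39, Ne.symm h40, Ne.symm h41, Ne.symm h42]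

-- ===== VERDICT (by name: the statement is the Claim_ definition above) =====
theorem findTagType_spec : Claim_equal_findTagType := by
  intro name _
  unfold Spec_findTagType findTagType findTagType_alt
  rw [bridge]
  exact chain_eq_lookup (PySem.Str.strip name)
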